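-- pv_equiv track=rewrite | github.com/VeraNik1/Home_work_PY_4 | home_work_4.py | get_berries_max_amount
-- ===== SOURCE A (Python) =====
-- def get_berries_max_amount(arr):
--     if len(arr) <= 3:
--         return sum(arr)
--     else:
--         arr.extend(arr[:2])
--         max_amount = sum(arr[:3])
--         for i in range(1, len(arr) - 2):
--             temp = sum(arr[i:i+3])
--             if temp > max_amount:
--                 max_amount= temp
--         return max_amount
-- ===== SOURCE B (Python) =====
-- def get_berries_max_amount(arr):
--     if len(arr) <= 3:
--         return sum(arr)
--     arr.extend(arr[:2])
--     pre = [0]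
--     for x in arr:
--         pre.append(pre[-1] + x)
--     return max(pre[i + 3] - pre[i] for i in range(len(arr) - 2))
-- ===== Notes on version B (the rewrite author's own statement) =====
-- stated objective: alternative
-- what changed: B replaces the per-window re-summation sum(arr[i:i+3]) with a prefix-sum table built in one pass, each circular window sum then being one subtraction pre[i+3]-pre[i], and takes the max of those differences.
import Mathlib
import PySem

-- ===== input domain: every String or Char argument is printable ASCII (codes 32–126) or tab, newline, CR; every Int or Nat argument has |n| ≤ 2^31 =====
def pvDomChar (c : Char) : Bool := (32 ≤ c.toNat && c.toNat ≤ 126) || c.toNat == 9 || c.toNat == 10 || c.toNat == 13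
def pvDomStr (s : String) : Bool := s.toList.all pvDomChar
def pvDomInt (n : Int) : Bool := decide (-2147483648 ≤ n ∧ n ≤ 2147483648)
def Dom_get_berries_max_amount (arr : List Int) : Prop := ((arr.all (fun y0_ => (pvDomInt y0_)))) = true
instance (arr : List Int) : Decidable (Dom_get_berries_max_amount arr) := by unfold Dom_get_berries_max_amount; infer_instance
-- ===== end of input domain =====

-- B replaces A's per-window re-summation with a prefix-sum table, each window sum becoming one
-- subtraction; both Pythons extend `arr` in place (same mutation), the theorem is about the return value.

-- ===== PORT A =====
def get_berries_max_amount (arr : List Int) : Int :=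
  if arr.length ≤ 3 then arr.sum
  else
    -- arr.extend(arr[:2])
    let ext := arr ++ PySem.List.slice arr none (some 2)
    -- max_amount = sum(arr[:3])
    let init := (PySem.List.slice ext none (some 3)).sum
    -- for i in range(1, len(arr) - 2): ...
    (PySem.List.pyRange 1 ((ext.length : Int) - 2) 1).foldl
      (fun max_amount i =>
        let temp := (PySem.List.slice ext (some i) (some (i + 3))).sum
        if temp > max_amount then temp else max_amount) init

-- ===== PORT B =====
def get_berries_max_amount_alt (arr : List Int) : Int :=
  if arr.length ≤ 3 then arr.sum
  else
    -- arr.extend(arr[:2])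
    let ext := arr ++ PySem.List.slice arr none (some 2)
    -- pre = [0]; for x in arr: pre.append(pre[-1] + x)
    let pre := ext.foldl (fun p x => p ++ [PySem.List.pyGetD p (-1) 0 + x]) [0]
    -- max(pre[i+3] - pre[i] for i in range(len(arr) - 2))  (range nonempty here, so max never raises)
    match PySem.List.max?
        ((PySem.List.pyRange 0 ((ext.length : Int) - 2) 1).map
          (fun i => PySem.List.pyGetD pre (i + 3) 0 - PySem.List.pyGetD pre i 0))
        (fun y => y) with
    | some m => m
    | none => 0

-- ===== PRECONDITION & SPEC =====
def Spec_get_berries_max_amount (arr : List Int) (out : Int) : Prop := out = get_berries_max_amount_alt arr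
instance (arr : List Int) (out : Int) : Decidable (Spec_get_berries_max_amount arr out) := by unfold Spec_get_berries_max_amount; infer_instance

-- ===== CLAIM (what is proved, stated in full; the proofs are below) =====
def Claim_equal_get_berries_max_amount : Prop := ∀ (arr : List Int), Dom_get_berries_max_amount arr → Spec_get_berries_max_amount arr (get_berries_max_amount arr)

-- ===== LEMMAS AND PROOFS =====

-- window sum: sum of the 3-element window of `ext` starting at k
def pvWin (ext : List Int) (k : Nat) : Int := ((ext.drop k).take 3).sum

-- B's prefix loop builds exactly the scanl of running sums
theorem pv_foldl_pre (xs p' : List Int) (a : Int) :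
    xs.foldl (fun p x => p ++ [PySem.List.pyGetD p (-1) 0 + x]) (p' ++ [a])
      = p' ++ xs.scanl (fun s x => s + x) a := by
  induction xs generalizing p' a with
  | nil => simp
  | cons x xs ih =>
      have hlast : PySem.List.pyGetD (p' ++ [a]) (-1) 0 = a := by simp [pysem]
      simp only [List.foldl_cons, List.scanl_cons, hlast]
      have := ih (p' ++ [a]) (a + x)
      simpa [List.append_assoc] using this

theorem pv_scanl_getD (xs : List Int) (a : Int) (i : Nat) (h : i ≤ xs.length) :
    (xs.scanl (fun s x => s + x) a).getD i 0 = a + (xs.take i).sum := by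
  induction xs generalizing a i with
  | nil =>
      have : i = 0 := by simpa using h
      subst this; simp
  | cons x xs ih =>
      cases i with
      | zero => simp
      | succ j =>
          simp only [List.scanl_cons, List.getD_cons_succ, List.take_succ_cons, List.sum_cons]
          rw [ih (a + x) j (by simpa using h)]
          ring

-- ===== VERDICT (by name: the statement is the Claim_ definition above) =====

theorem get_berries_max_amount_spec : Claim_equal_get_berries_max_amount := by
  intro arr _
  unfold Spec_get_berries_max_amount get_berries_max_amount get_berries_max_amount_alt
  by_cases hle : arr.length ≤ 3
  · simp [hle]
  · simp only [hle, if_false]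
    set n := arr.length with hn
    have hn4 : 4 ≤ n := by omega
    obtain ⟨m, hm⟩ : ∃ m, n = m + 1 := ⟨n - 1, by omega⟩
    have hsl : PySem.List.slice arr none (some 2) = arr.take 2 := by
      rw [PySem.List.slice_to arr (by norm_num)]; rfl
    set ext := arr ++ PySem.List.slice arr none (some 2) with hext
    have hlen : ext.length = n + 2 := by
      rw [hext, hsl, List.length_append, List.length_take]; omega
    -- prefix list
    have hpre : ext.foldl (fun p x => p ++ [PySem.List.pyGetD p (-1) 0 + x]) [0]
        = ext.scanl (fun s x => s + x) 0 := by
      simpa using pv_foldl_pre ext [] 0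
    have hpreD : ∀ k : Nat, k ≤ n + 2 →
        (ext.scanl (fun s x => s + x) 0).getD k 0 = (ext.take k).sum := by
      intro k hk
      rw [pv_scanl_getD ext 0 k (by omega)]; ring
    -- each prefix difference is a window sum
    have hdiff : ∀ k : Nat, k ≤ n - 1 →
        (ext.take (k + 3)).sum - (ext.take k).sum = pvWin ext k := by
      intro k hk
      have : ext.take (k + 3) = ext.take k ++ (ext.drop k).take 3 := List.take_add
      rw [this, List.sum_append, pvWin]; ring
    -- A's slice windows
    have hsliceA : ∀ k : Nat, PySem.List.slice ext (some ((k : Int))) (some ((k : Int) + 3)) = (ext.drop k).take 3 := by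
      intro k
      have h3 : ((3 : Nat) : Int) = 3 := by norm_num
      rw [← h3, PySem.List.slice_natCast_add]
    -- length arithmetic
    have hlenI : ((ext.length : Int) - 2) = (n : Int) := by
      rw [hlen]; push_cast; ring
    -- B's mapped list = window sums over range n
    have hBlist :
        (PySem.List.pyRange 0 ((ext.length : Int) - 2) 1).map
          (fun i => PySem.List.pyGetD (ext.scanl (fun s x => s + x) 0) (i + 3) 0
                  - PySem.List.pyGetD (ext.scanl (fun s x => s + x) 0) i 0)
        = (List.range n).map (fun k => pvWin ext k) := by
      rw [hlenI, PySem.List.pyRange_zero_natCast, List.map_map]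
      apply List.map_congr_left
      intro k hk
      have hk' : k < n := List.mem_range.mp hk
      have h1 : ((k : Int) + 3) = ((k + 3 : Nat) : Int) := by push_cast; ring
      simp only [Function.comp, h1, PySem.List.pyGetD_natCast]
      rw [hpreD (k + 3) (by omega), hpreD k (by omega), hdiff k (by omega)]
    -- A's initial value is the window at 0
    have hinit : (PySem.List.slice ext none (some 3)).sum = pvWin ext 0 := by
      rw [PySem.List.slice_to ext (by norm_num)]
      simp [pvWin]
    -- A = running max over windows 1..n-1 starting from window 0
    have hA :
        (PySem.List.pyRange 1 ((ext.length : Int) - 2) 1).foldl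
          (fun max_amount i =>
            let temp := (PySem.List.slice ext (some i) (some (i + 3))).sum
            if temp > max_amount then temp else max_amount)
          ((PySem.List.slice ext none (some 3)).sum)
        = (List.range m).foldl (fun acc k => max acc (pvWin ext (k + 1))) (pvWin ext 0) := by
      rw [hlenI, hinit, PySem.List.pyRange_one, List.foldl_map]
      have harg : ((n : Int) - 1).toNat = m := by omega
      rw [harg]
      apply PySem.List.foldl_congr_mem
      intro acc k hk
      have h1 : (1 : Int) + (k : Int) = ((k + 1 : Nat) : Int) := by push_cast; ring
      simp only [h1, hsliceA (k + 1)]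
      change (if pvWin ext (k+1) > acc then pvWin ext (k+1) else acc) = max acc (pvWin ext (k+1))
      rcases le_or_gt (pvWin ext (k+1)) acc with h | h
      · rw [if_neg (by omega), max_eq_left h]
      · rw [if_pos h, max_eq_right (le_of_lt h)]
    -- B = the same running max
    have hrange : List.range n = 0 :: (List.range m).map Nat.succ := by
      rw [hm, List.range_succ_eq_map]
    rw [hpre, hBlist, hA, hrange]
    simp only [List.map_cons, List.map_map]
    rw [PySem.List.max?_id_cons]
    simp only [List.foldl_map]
    rfl
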